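-- pv_equiv track=rewrite | github.com/pilipandr770/WAT-PRUFER | app/services/check_service.py | aggregate_status
-- ===== SOURCE A (Python) =====
-- def aggregate_status(results: dict) -> str:
--     statuses = [r.get("status", "unknown") for r in results.values()]
--     if "critical" in statuses:
--         return "critical"
--     if "error" in statuses:
--         return "error"
--     if "ok" in statuses:
--         return "ok"
--     return "unknown"
-- ===== SOURCE B (Python) =====
-- RANK = {"critical": 0, "error": 1, "ok": 2, "unknown": 3}
--
--
-- def _rank(s):
--     return RANK.get(s, 3)
--
--
-- def aggregate_status(results: dict) -> str:
--     worst = "unknown"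
--     for r in results.values():
--         s = r.get("status", "unknown")
--         if _rank(s) < _rank(worst):
--             worst = s
--     return worst
-- ===== Notes on version B (the rewrite author's own statement) =====
-- stated objective: simpler
-- what changed: Replaced building a statuses list plus three separate membership scans by a single pass over the values that keeps the worst status seen so far via a priority-rank table.
import Mathlib
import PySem

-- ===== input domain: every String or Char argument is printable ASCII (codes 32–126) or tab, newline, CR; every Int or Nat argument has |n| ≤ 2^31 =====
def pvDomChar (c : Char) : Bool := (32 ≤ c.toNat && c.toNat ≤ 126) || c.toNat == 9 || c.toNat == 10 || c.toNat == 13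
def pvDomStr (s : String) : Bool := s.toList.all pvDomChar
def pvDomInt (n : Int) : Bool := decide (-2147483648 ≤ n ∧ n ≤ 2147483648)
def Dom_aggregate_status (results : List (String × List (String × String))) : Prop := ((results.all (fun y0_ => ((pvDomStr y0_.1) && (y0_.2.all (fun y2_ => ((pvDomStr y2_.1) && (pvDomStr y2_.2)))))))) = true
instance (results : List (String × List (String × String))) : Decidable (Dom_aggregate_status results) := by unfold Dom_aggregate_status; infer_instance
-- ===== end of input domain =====

-- B replaces the statuses list and three membership scans by a single pass keeping the
-- worst status via a rank table (objective: simpler).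

-- ===== PORT A =====
def aggregate_status (results : List (String × List (String × String))) : String :=
  let statuses := (PySem.Dict.ofList results).values.map
    (fun r => PySem.Dict.getD (PySem.Dict.ofList r) "status" "unknown")
  if "critical" ∈ statuses then "critical"
  else if "error" ∈ statuses then "error"
  else if "ok" ∈ statuses then "ok"
  else "unknown"

-- ===== PORT B =====
-- RANK.get(s, 3)
def pvRank (s : String) : Int :=
  PySem.Dict.getD (PySem.Dict.ofList [("critical", (0 : Int)), ("error", 1), ("ok", 2), ("unknown", 3)]) s 3

def aggregate_status_alt (results : List (String × List (String × String))) : String :=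
  (PySem.Dict.ofList results).values.foldl
    (fun worst r =>
      let s := PySem.Dict.getD (PySem.Dict.ofList r) "status" "unknown"
      if pvRank s < pvRank worst then s else worst)
    "unknown"

-- ===== PRECONDITION & SPEC =====
def Spec_aggregate_status (results : List (String × List (String × String))) (out : String) : Prop := out = aggregate_status_alt results
instance (results : List (String × List (String × String))) (out : String) : Decidable (Spec_aggregate_status results out) := by unfold Spec_aggregate_status; infer_instance

-- ===== CLAIM (what is proved, stated in full; the proofs are below) =====
def Claim_equal_aggregate_status : Prop := ∀ (results : List (String × List (String × String))), Dom_aggregate_status results → Spec_aggregate_status results (aggregate_status results)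

-- ===== LEMMAS AND PROOFS =====

-- A's membership chain, as a function of the statuses list
def pvSel (L : List String) : String :=
  if "critical" ∈ L then "critical"
  else if "error" ∈ L then "error"
  else if "ok" ∈ L then "ok"
  else "unknown"

lemma pvRank_other {s : String} (h1 : s ≠ "critical") (h2 : s ≠ "error") (h3 : s ≠ "ok") :
    pvRank s = 3 := by
  by_cases h4 : s = "unknown"
  · subst h4; decide
  · have hmk : PySem.Dict.ofList [("critical", (0 : Int)), ("error", 1), ("ok", 2), ("unknown", 3)]
        = PySem.Dict.mk [("critical", 0), ("error", 1), ("ok", 2), ("unknown", 3)] := by decide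
    simp [pvRank, PySem.Dict.getD_eq_get?_getD, hmk,
      beq_iff_eq, Ne.symm h1, Ne.symm h2, Ne.symm h3, Ne.symm h4, PySem.Dict.get?]

lemma pvRank_le_three (s : String) : pvRank s ≤ 3 := by
  by_cases h1 : s = "critical"
  · subst h1; decide
  by_cases h2 : s = "error"
  · subst h2; decide
  by_cases h3 : s = "ok"
  · subst h3; decide
  by_cases h4 : s = "unknown"
  · subst h4; decide
  · rw [pvRank_other h1 h2 h3]

lemma pvSel_cons (s : String) (L : List String) :
    pvSel (s :: L) = if pvRank s < pvRank (pvSel L) then s else pvSel L := by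
  by_cases h1 : s = "critical"
  · subst h1
    simp only [pvSel, List.mem_cons]
    by_cases hc : "critical" ∈ L <;> by_cases he : "error" ∈ L <;> by_cases ho : "ok" ∈ L <;>
      simp [hc, he, ho] <;> decide
  by_cases h2 : s = "error"
  · subst h2
    simp only [pvSel, List.mem_cons]
    by_cases hc : "critical" ∈ L <;> by_cases he : "error" ∈ L <;> by_cases ho : "ok" ∈ L <;>
      simp [hc, he, ho] <;> decide
  by_cases h3 : s = "ok"
  · subst h3
    simp only [pvSel, List.mem_cons]
    by_cases hc : "critical" ∈ L <;> by_cases he : "error" ∈ L <;> by_cases ho : "ok" ∈ L <;>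
      simp [hc, he, ho] <;> decide
  · have hr : pvRank s = 3 := pvRank_other h1 h2 h3
    have hle := pvRank_le_three (pvSel L)
    have hlt : ¬ pvRank s < pvRank (pvSel L) := by omega
    rw [if_neg hlt]
    simp [pvSel, List.mem_cons, Ne.symm h1, Ne.symm h2, Ne.symm h3]

lemma pvRank_sel_lt {L : List String} (h : pvSel L ≠ "unknown") : pvRank (pvSel L) < 3 := by
  unfold pvSel at *
  split_ifs at * <;> first | decide | simp_all

lemma pvRank_cases (s : String) :
    s = "critical" ∨ s = "error" ∨ s = "ok" ∨ pvRank s = 3 := by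
  by_cases h1 : s = "critical"
  · exact Or.inl h1
  by_cases h2 : s = "error"
  · exact Or.inr (Or.inl h2)
  by_cases h3 : s = "ok"
  · exact Or.inr (Or.inr (Or.inl h3))
  · exact Or.inr (Or.inr (Or.inr (pvRank_other h1 h2 h3)))

lemma pvRank_inj {a b : String} (ha : pvRank a < 3) (h : pvRank a = pvRank b) : a = b := by
  rcases pvRank_cases a with ra | ra | ra | ra <;>
    rcases pvRank_cases b with rb | rb | rb | rb <;>
      (try subst ra) <;> (try subst rb) <;> first | rfl | (revert h ha; decide) | omega

lemma pvFold_eq (L : List String) (w : String) :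
    L.foldl (fun worst s => if pvRank s < pvRank worst then s else worst) w
      = if pvRank (pvSel L) < pvRank w then pvSel L else w := by
  induction L generalizing w with
  | nil =>
    have := pvRank_le_three w
    have hu : pvSel [] = "unknown" := rfl
    rw [hu, List.foldl_nil, if_neg]
    have : pvRank "unknown" = 3 := by decide
    omega
  | cons s L ih =>
    rw [List.foldl_cons, ih, pvSel_cons]
    have h3w := pvRank_le_three w
    have h3s := pvRank_le_three s
    have h3L := pvRank_le_three (pvSel L)
    split_ifs <;> first
      | rfl
      | omega
      | (apply pvRank_inj <;> omega)

-- ===== VERDICT (by name: the statement is the Claim_ definition above) =====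
theorem aggregate_status_spec : Claim_equal_aggregate_status := by
  intro results _
  unfold Spec_aggregate_status aggregate_status aggregate_status_alt
  have halt : ∀ (l : List (List (String × String))) (init : String),
      l.foldl (fun worst r =>
        let s := PySem.Dict.getD (PySem.Dict.ofList r) "status" "unknown"
        if pvRank s < pvRank worst then s else worst) init
      = (l.map (fun r => PySem.Dict.getD (PySem.Dict.ofList r) "status" "unknown")).foldl
          (fun worst s => if pvRank s < pvRank worst then s else worst) init := by
    intro l init
    rw [List.foldl_map]
  rw [halt]
  rw [pvFold_eq]
  set L := ((PySem.Dict.ofList results).values.map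
    (fun r => PySem.Dict.getD (PySem.Dict.ofList r) "status" "unknown")) with hL
  show pvSel L = _
  by_cases hu : pvSel L = "unknown"
  · rw [hu, if_neg]
    have : pvRank "unknown" = 3 := by decide
    omega
  · rw [if_pos]
    have := pvRank_sel_lt hu
    have : pvRank "unknown" = 3 := by decide
    omega
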